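-- pv_equiv track=rewrite | github.com/estevanhernandez-stack-ed/PriceScout | api/entra_auth.py | _map_entra_role_to_local
-- ===== SOURCE A (Python) =====
-- from typing import Optional, List, Dict, Any
--
-- def _map_entra_role_to_local(entra_roles: List[str]) -> str:
--     """
--     Map Entra ID app roles to local application roles.
--
--     Priority: admin > manager > user
--
--     Args:
--         entra_roles: List of role values from Entra token
--
--     Returns:
--         Local role string: 'admin', 'manager', or 'user'
--     """
--     # Normalize role names (Entra roles are case-sensitive)
--     roles_lower = [r.lower() for r in entra_roles]
--
--     if "admin" in roles_lower or "pricescout.admin" in roles_lower: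
--         return "admin"
--     elif "manager" in roles_lower or "pricescout.manager" in roles_lower:
--         return "manager"
--     elif "user" in roles_lower or "pricescout.user" in roles_lower:
--         return "user"
--     else:
--         # Default to user if no recognized role
--         return "user"
-- ===== SOURCE B (Python) =====
-- from typing import List
--
-- _PRIORITY = {"admin": 3, "pricescout.admin": 3,
--              "manager": 2, "pricescout.manager": 2,
--              "user": 1, "pricescout.user": 1}
--
-- _LOCAL = {3: "admin", 2: "manager", 1: "user", 0: "user"}
--
-- def _map_entra_role_to_local(entra_roles: List[str]) -> str:
--     best = 0
--     for r in entra_roles: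
--         best = max(best, _PRIORITY.get(r.lower(), 0))
--     return _LOCAL[best]
-- ===== Notes on version B (the rewrite author's own statement) =====
-- stated objective: alternative
-- what changed: Replaces the build-a-lowercased-copy-then-six-membership-scans approach with a single pass that folds each role to a numeric priority via a lookup table, keeps the running maximum, and decodes it to the local role at the end.
import Mathlib
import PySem

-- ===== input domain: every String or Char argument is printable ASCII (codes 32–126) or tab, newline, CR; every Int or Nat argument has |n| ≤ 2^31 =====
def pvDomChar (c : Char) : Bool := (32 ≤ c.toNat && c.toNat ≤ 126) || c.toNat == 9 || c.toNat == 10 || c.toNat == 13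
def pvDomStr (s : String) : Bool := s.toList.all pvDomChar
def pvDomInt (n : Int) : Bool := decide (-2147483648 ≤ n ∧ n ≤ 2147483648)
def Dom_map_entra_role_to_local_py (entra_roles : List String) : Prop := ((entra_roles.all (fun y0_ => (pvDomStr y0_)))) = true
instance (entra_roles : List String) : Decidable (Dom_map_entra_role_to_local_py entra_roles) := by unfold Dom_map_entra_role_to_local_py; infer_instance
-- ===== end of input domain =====

-- B replaces the lowered-copy-plus-six-membership-scans decomposition by a single fold to a
-- numeric best priority (via a lookup table) decoded to the local role at the end (alternative).

-- ===== PORT A =====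
def map_entra_role_to_local_py (entra_roles : List String) : String :=
  -- roles_lower = [r.lower() for r in entra_roles]
  let roles_lower := entra_roles.map PySem.Str.lower
  if roles_lower.contains "admin" || roles_lower.contains "pricescout.admin" then "admin"
  else if roles_lower.contains "manager" || roles_lower.contains "pricescout.manager" then "manager"
  else if roles_lower.contains "user" || roles_lower.contains "pricescout.user" then "user"
  else "user"

-- ===== PORT B =====
-- _PRIORITY
def pvPriority : PySem.Dict String Int :=
  PySem.Dict.ofList [("admin", 3), ("pricescout.admin", 3),
                     ("manager", 2), ("pricescout.manager", 2),
                     ("user", 1), ("pricescout.user", 1)]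

-- _LOCAL
def pvLocal : PySem.Dict Int String :=
  PySem.Dict.ofList [(3, "admin"), (2, "manager"), (1, "user"), (0, "user")]

def map_entra_role_to_local_py_alt (entra_roles : List String) : String :=
  let best := entra_roles.foldl (fun b r => max b (pvPriority.getD (PySem.Str.lower r) 0)) 0
  -- _LOCAL[best]; best is always one of 0,1,2,3 so the KeyError branch is unreachable
  (pvLocal.get? best).getD ""

-- ===== PRECONDITION & SPEC =====
def Spec_map_entra_role_to_local_py (entra_roles : List String) (out : String) : Prop := out = map_entra_role_to_local_py_alt entra_roles
instance (entra_roles : List String) (out : String) : Decidable (Spec_map_entra_role_to_local_py entra_roles out) := by unfold Spec_map_entra_role_to_local_py; infer_instance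

-- ===== CLAIM (what is proved, stated in full; the proofs are below) =====
def Claim_equal_map_entra_role_to_local_py : Prop := ∀ (entra_roles : List String), Dom_map_entra_role_to_local_py entra_roles → Spec_map_entra_role_to_local_py entra_roles (map_entra_role_to_local_py entra_roles)

-- ===== LEMMAS AND PROOFS =====

-- the per-element priority
def pvP (s : String) : Int := pvPriority.getD s 0

-- the fold result
def pvF (l : List String) : Int :=
  l.foldl (fun b r => max b (pvPriority.getD (PySem.Str.lower r) 0)) 0

lemma pvP_ifchain (s : String) : pvP s =
    if s = "admin" then 3 else if s = "pricescout.admin" then 3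
    else if s = "manager" then 2 else if s = "pricescout.manager" then 2
    else if s = "user" then 1 else if s = "pricescout.user" then 1 else 0 := by
  simp [pvP, pvPriority, PySem.Dict.ofList, PySem.Dict.getD, PySem.Dict.get?,
        PySem.Dict.update, PySem.Dict.insert, PySem.Dict.contains,
        PySem.Dict.empty, List.find?]
  by_cases h1 : s = "admin"
  · simp [h1]
  by_cases h2 : s = "pricescout.admin"
  · simp [h2]
  by_cases h3 : s = "manager"
  · simp [h3]
  by_cases h4 : s = "pricescout.manager"
  · simp [h4]
  by_cases h5 : s = "user"
  · simp [h5]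
  by_cases h6 : s = "pricescout.user"
  · simp [h6]
  have b1 : ("admin" == s) = false := beq_eq_false_iff_ne.mpr (fun h => h1 h.symm)
  have b2 : ("pricescout.admin" == s) = false := beq_eq_false_iff_ne.mpr (fun h => h2 h.symm)
  have b3 : ("manager" == s) = false := beq_eq_false_iff_ne.mpr (fun h => h3 h.symm)
  have b4 : ("pricescout.manager" == s) = false := beq_eq_false_iff_ne.mpr (fun h => h4 h.symm)
  have b5 : ("user" == s) = false := beq_eq_false_iff_ne.mpr (fun h => h5 h.symm)
  have b6 : ("pricescout.user" == s) = false := beq_eq_false_iff_ne.mpr (fun h => h6 h.symm)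
  rw [b1, b2, b3, b4, b5, b6]
  simp [h1, h2, h3, h4, h5, h6]

lemma pvP_bounds (s : String) : 0 ≤ pvP s ∧ pvP s ≤ 3 := by
  rw [pvP_ifchain]; split_ifs <;> omega

lemma pvP_eq3 (s : String) : pvP s = 3 ↔ (s = "admin" ∨ s = "pricescout.admin") := by
  rw [pvP_ifchain]; split_ifs <;> simp_all

lemma pvP_eq2 (s : String) : pvP s = 2 ↔ (s = "manager" ∨ s = "pricescout.manager") := by
  rw [pvP_ifchain]; split_ifs <;> simp_all

lemma pvF_acc (l : List String) (b : Int) (hb : 0 ≤ b) :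
    l.foldl (fun b r => max b (pvPriority.getD (PySem.Str.lower r) 0)) b = max b (pvF l) := by
  induction l generalizing b with
  | nil => simp [pvF]; omega
  | cons r t ih =>
    have hp := pvP_bounds (PySem.Str.lower r)
    simp only [pvP] at hp
    simp only [pvF, List.foldl_cons]
    rw [ih _ (by omega), ih _ (by omega)]
    omega

lemma pvF_cons (r : String) (t : List String) :
    pvF (r :: t) = max (pvP (PySem.Str.lower r)) (pvF t) := by
  have hp := pvP_bounds (PySem.Str.lower r)
  simp only [pvP] at hp
  simp only [pvF, List.foldl_cons]
  rw [pvF_acc t _ (by omega)]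
  simp only [pvP, pvF]
  omega

lemma pvF_bounds (l : List String) : 0 ≤ pvF l ∧ pvF l ≤ 3 := by
  induction l with
  | nil => simp [pvF]
  | cons r t ih =>
    have := pvP_bounds (PySem.Str.lower r)
    rw [pvF_cons]; omega

lemma pvF_eq3 (l : List String) : pvF l = 3 ↔ ∃ r ∈ l, pvP (PySem.Str.lower r) = 3 := by
  induction l with
  | nil => simp [pvF]
  | cons r t ih =>
    have h1 := pvP_bounds (PySem.Str.lower r)
    have h2 := pvF_bounds t
    rw [pvF_cons]
    constructor
    · intro h
      rcases (by omega : pvP (PySem.Str.lower r) = 3 ∨ pvF t = 3) with h' | h'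
      · exact ⟨r, by simp, h'⟩
      · obtain ⟨x, hx, hpx⟩ := ih.mp h'
        exact ⟨x, by simp [hx], hpx⟩
    · rintro ⟨x, hx, hpx⟩
      rcases List.mem_cons.mp hx with rfl | hx'
      · omega
      · have := ih.mpr ⟨x, hx', hpx⟩; omega

lemma pvF_ge2 (l : List String) : 2 ≤ pvF l ↔ ∃ r ∈ l, 2 ≤ pvP (PySem.Str.lower r) := by
  induction l with
  | nil => simp [pvF]
  | cons r t ih =>
    rw [pvF_cons]
    constructor
    · intro h
      rcases (by omega : 2 ≤ pvP (PySem.Str.lower r) ∨ 2 ≤ pvF t) with h' | h'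
      · exact ⟨r, by simp, h'⟩
      · obtain ⟨x, hx, hpx⟩ := ih.mp h'
        exact ⟨x, by simp [hx], hpx⟩
    · rintro ⟨x, hx, hpx⟩
      rcases List.mem_cons.mp hx with rfl | hx'
      · omega
      · have := ih.mpr ⟨x, hx', hpx⟩; omega

lemma contains_lower_iff (l : List String) (c : String) :
    (l.map PySem.Str.lower).contains c = true ↔ ∃ r ∈ l, PySem.Str.lower r = c := by
  simp [List.mem_map, eq_comm]

lemma cond3_iff (l : List String) :
    ((l.map PySem.Str.lower).contains "admin" || (l.map PySem.Str.lower).contains "pricescout.admin") = true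
      ↔ pvF l = 3 := by
  rw [Bool.or_eq_true, contains_lower_iff, contains_lower_iff, pvF_eq3]
  constructor
  · rintro (⟨r, hr, h⟩ | ⟨r, hr, h⟩) <;> exact ⟨r, hr, (pvP_eq3 _).mpr (by simp [h])⟩
  · rintro ⟨r, hr, h⟩
    rcases (pvP_eq3 _).mp h with h' | h'
    · exact Or.inl ⟨r, hr, h'⟩
    · exact Or.inr ⟨r, hr, h'⟩

lemma cond2_iff (l : List String) :
    ((l.map PySem.Str.lower).contains "manager" || (l.map PySem.Str.lower).contains "pricescout.manager") = true
      ↔ ∃ r ∈ l, pvP (PySem.Str.lower r) = 2 := by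
  rw [Bool.or_eq_true, contains_lower_iff, contains_lower_iff]
  constructor
  · rintro (⟨r, hr, h⟩ | ⟨r, hr, h⟩) <;> exact ⟨r, hr, (pvP_eq2 _).mpr (by simp [h])⟩
  · rintro ⟨r, hr, h⟩
    rcases (pvP_eq2 _).mp h with h' | h'
    · exact Or.inl ⟨r, hr, h'⟩
    · exact Or.inr ⟨r, hr, h'⟩

lemma pvLocal_get3 : (pvLocal.get? 3).getD "" = "admin" := by decide
lemma pvLocal_get2 : (pvLocal.get? 2).getD "" = "manager" := by decide
lemma pvLocal_get1 : (pvLocal.get? 1).getD "" = "user" := by decide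
lemma pvLocal_get0 : (pvLocal.get? 0).getD "" = "user" := by decide

-- ===== VERDICT (by name: the statement is the Claim_ definition above) =====
theorem map_entra_role_to_local_py_spec : Claim_equal_map_entra_role_to_local_py := by
  intro l _
  unfold Spec_map_entra_role_to_local_py map_entra_role_to_local_py map_entra_role_to_local_py_alt
  show _ = (pvLocal.get? (pvF l)).getD ""
  have hbd := pvF_bounds l
  by_cases h3 : ((l.map PySem.Str.lower).contains "admin" || (l.map PySem.Str.lower).contains "pricescout.admin") = true
  · rw [(cond3_iff l).mp h3, pvLocal_get3]
    simp only [h3, if_true]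
  · have hF3 : pvF l ≠ 3 := fun h => h3 ((cond3_iff l).mpr h)
    by_cases h2 : ((l.map PySem.Str.lower).contains "manager" || (l.map PySem.Str.lower).contains "pricescout.manager") = true
    · obtain ⟨r, hr, hp⟩ := (cond2_iff l).mp h2
      have hge : 2 ≤ pvF l := (pvF_ge2 l).mpr ⟨r, hr, by omega⟩
      rw [(by omega : pvF l = 2), pvLocal_get2]
      simp only [h3, h2, Bool.false_eq_true, if_false, if_true]
    · have hne2 : ¬ ∃ r ∈ l, pvP (PySem.Str.lower r) = 2 := fun h => h2 ((cond2_iff l).mpr h)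
      have hne3 : ¬ ∃ r ∈ l, pvP (PySem.Str.lower r) = 3 := fun h => hF3 ((pvF_eq3 l).mpr h)
      have hle : pvF l ≤ 1 := by
        by_contra hgt
        obtain ⟨r, hr, hp⟩ := (pvF_ge2 l).mp (by omega)
        have := (pvP_bounds (PySem.Str.lower r)).2
        rcases (by omega : pvP (PySem.Str.lower r) = 2 ∨ pvP (PySem.Str.lower r) = 3) with h | h
        · exact hne2 ⟨r, hr, h⟩
        · exact hne3 ⟨r, hr, h⟩
      have hval : (pvLocal.get? (pvF l)).getD "" = "user" := by
        rcases (by omega : pvF l = 0 ∨ pvF l = 1) with hF | hF <;> rw [hF]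
        · exact pvLocal_get0
        · exact pvLocal_get1
      rw [hval]
      by_cases h1 : ((l.map PySem.Str.lower).contains "user" || (l.map PySem.Str.lower).contains "pricescout.user") = true <;>
        simp only [h3, h2, h1, Bool.false_eq_true, if_false, if_true]
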